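-- pv_equiv track=rewrite | github.com/dylanxlam/CS313E_notes | CS_313E_A6/dylan.py | request_space
-- ===== SOURCE A (Python) =====
-- def request_space(office, cubicles):
--     w = office[2]
--     h = office[3]
--     bldg = [[0] * w for _ in range(h)]
--
--     for i, (employee, rect) in enumerate(cubicles):
--         for x in range(rect[0], rect[2]):
--             for y in range(rect[1], rect[3]):
--                 if bldg[y][x] == 0:
--                     bldg[y][x] = i + 1
--                 else:
--                     # Mark as contested if already assigned
--                     bldg[y][x] = -1
--
--     return bldg
-- ===== SOURCE B (Python) =====
-- def request_space(office, cubicles):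
--     w = office[2]
--     h = office[3]
--     count = [[0] * w for _ in range(h)]
--     owner = [[0] * w for _ in range(h)]
--
--     for i, (employee, rect) in enumerate(cubicles):
--         for x in range(rect[0], rect[2]):
--             for y in range(rect[1], rect[3]):
--                 count[y][x] = count[y][x] + 1
--                 owner[y][x] = i + 1
--
--     return [[0 if count[y][x] == 0 else (owner[y][x] if count[y][x] == 1 else -1)
--              for x in range(w)] for y in range(h)]
-- ===== Notes on version B (the rewrite author's own statement) =====
-- stated objective: alternative
-- what changed: Instead of deciding contested-vs-owner inside the stamping branch, B stamps a coverage-count grid and a last-owner grid with no branching, then resolves the whole output in a separate final pass (0 / unique owner / -1 by count); correctness rests on each cubicle touching each cell at most once.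
import Mathlib
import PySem

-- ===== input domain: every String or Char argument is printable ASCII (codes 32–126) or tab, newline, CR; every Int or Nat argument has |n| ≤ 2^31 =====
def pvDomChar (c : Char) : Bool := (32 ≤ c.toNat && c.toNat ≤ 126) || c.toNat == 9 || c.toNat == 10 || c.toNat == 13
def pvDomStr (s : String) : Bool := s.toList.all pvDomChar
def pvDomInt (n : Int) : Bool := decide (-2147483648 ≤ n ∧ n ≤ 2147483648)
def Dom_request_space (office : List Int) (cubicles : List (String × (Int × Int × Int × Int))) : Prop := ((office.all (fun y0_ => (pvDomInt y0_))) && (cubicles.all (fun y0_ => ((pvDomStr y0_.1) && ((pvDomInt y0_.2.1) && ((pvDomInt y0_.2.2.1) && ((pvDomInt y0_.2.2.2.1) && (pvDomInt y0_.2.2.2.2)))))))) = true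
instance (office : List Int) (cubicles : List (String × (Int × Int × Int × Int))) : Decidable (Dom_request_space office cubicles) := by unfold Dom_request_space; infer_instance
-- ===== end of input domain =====

-- B replaces A's branch-while-stamping with branch-free stamping of a coverage-count grid plus a
-- last-owner grid, followed by a separate resolution pass (alternative decomposition, same cost).

-- ===== PORT A =====
def request_space (office : List Int) (cubicles : List (String × (Int × Int × Int × Int))) : List (List Int) :=
  let w := PySem.List.pyGetD office 2 0
  let h := PySem.List.pyGetD office 3 0
  let bldg := List.replicate h.toNat (List.replicate w.toNat (0 : Int))
  (PySem.List.enumerate cubicles 0).foldl (fun bldg p =>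
    let i := p.1
    let rect := p.2.2
    (PySem.List.pyRange rect.1 rect.2.2.1 1).foldl (fun bldg x =>
      (PySem.List.pyRange rect.2.1 rect.2.2.2 1).foldl (fun bldg y =>
        if PySem.List.pyGetD (PySem.List.pyGetD bldg y []) x 0 = 0 then
          PySem.List.pySetD bldg y (PySem.List.pySetD (PySem.List.pyGetD bldg y []) x (i + 1))
        else
          PySem.List.pySetD bldg y (PySem.List.pySetD (PySem.List.pyGetD bldg y []) x (-1))
      ) bldg) bldg) bldg

-- ===== PORT B =====
def request_space_alt (office : List Int) (cubicles : List (String × (Int × Int × Int × Int))) : List (List Int) :=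
  let w := PySem.List.pyGetD office 2 0
  let h := PySem.List.pyGetD office 3 0
  let count := List.replicate h.toNat (List.replicate w.toNat (0 : Int))
  let owner := List.replicate h.toNat (List.replicate w.toNat (0 : Int))
  let st := (PySem.List.enumerate cubicles 0).foldl (fun (st : List (List Int) × List (List Int)) p =>
    let i := p.1
    let rect := p.2.2
    (PySem.List.pyRange rect.1 rect.2.2.1 1).foldl (fun st x =>
      (PySem.List.pyRange rect.2.1 rect.2.2.2 1).foldl (fun st y =>
        (PySem.List.pySetD st.1 y (PySem.List.pySetD (PySem.List.pyGetD st.1 y []) x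
            (PySem.List.pyGetD (PySem.List.pyGetD st.1 y []) x 0 + 1)),
         PySem.List.pySetD st.2 y (PySem.List.pySetD (PySem.List.pyGetD st.2 y []) x (i + 1)))
      ) st) st) (count, owner)
  (PySem.List.pyRange 0 h 1).map (fun y =>
    (PySem.List.pyRange 0 w 1).map (fun x =>
      if PySem.List.pyGetD (PySem.List.pyGetD st.1 y []) x 0 = 0 then 0
      else if PySem.List.pyGetD (PySem.List.pyGetD st.1 y []) x 0 = 1 then
        PySem.List.pyGetD (PySem.List.pyGetD st.2 y []) x 0
      else -1))

-- ===== PRECONDITION & SPEC =====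
-- Pre_ excludes exactly the inputs where Python A raises (IndexError): office shorter than 4, or a
-- nonempty cubicle rectangle with a visited cell outside Python's (wrap-aware) index range.
def Pre_request_space (office : List Int) (cubicles : List (String × (Int × Int × Int × Int))) : Prop :=
  4 ≤ office.length ∧ ∀ c ∈ cubicles,
    (c.2.1 < c.2.2.2.1 ∧ c.2.2.1 < c.2.2.2.2) →
      (-(office.getD 3 0) ≤ c.2.2.1 ∧ c.2.2.2.2 ≤ office.getD 3 0 ∧
       -(office.getD 2 0) ≤ c.2.1 ∧ c.2.2.2.1 ≤ office.getD 2 0)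
instance (office : List Int) (cubicles : List (String × (Int × Int × Int × Int))) : Decidable (Pre_request_space office cubicles) := by unfold Pre_request_space; infer_instance

def pvWitness_request_space : List Int × (List (String × (Int × Int × Int × Int))) :=
  ([0, 0, 3, 2], [("a", (0, 0, 2, 1)), ("b", (1, 0, 3, 2))])

def Spec_request_space (office : List Int) (cubicles : List (String × (Int × Int × Int × Int))) (out : List (List Int)) : Prop := out = request_space_alt office cubicles
instance (office : List Int) (cubicles : List (String × (Int × Int × Int × Int))) (out : List (List Int)) : Decidable (Spec_request_space office cubicles out) := by unfold Spec_request_space; infer_instance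

-- ===== CLAIM (what is proved, stated in full; the proofs are below) =====
def Claim_equal_request_space : Prop := ∀ (office : List Int) (cubicles : List (String × (Int × Int × Int × Int))), Dom_request_space office cubicles → Pre_request_space office cubicles → Spec_request_space office cubicles (request_space office cubicles)

-- ===== LEMMAS AND PROOFS =====

def pvCell (b c o : Int) : Prop :=
  0 ≤ c ∧ (c = 0 → b = 0 ∧ o = 0) ∧ (c = 1 → b = o ∧ 1 ≤ o) ∧ (2 ≤ c → b = -1)

def pvRowRel (br cr orr : List Int) : Prop :=
  br.length = cr.length ∧ cr.length = orr.length ∧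
  ∀ k : Nat, pvCell (br.getD k 0) (cr.getD k 0) (orr.getD k 0)

def pvRel (b c o : List (List Int)) : Prop :=
  b.length = c.length ∧ c.length = o.length ∧
  ∀ j : Nat, pvRowRel (b.getD j []) (c.getD j []) (o.getD j [])

def pvShape (H W : Nat) (b : List (List Int)) : Prop :=
  b.length = H ∧ ∀ r ∈ b, r.length = W

def pvStepA (b : List (List Int)) (x y v : Int) : List (List Int) :=
  if PySem.List.pyGetD (PySem.List.pyGetD b y []) x 0 = 0 then
    PySem.List.pySetD b y (PySem.List.pySetD (PySem.List.pyGetD b y []) x v)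
  else
    PySem.List.pySetD b y (PySem.List.pySetD (PySem.List.pyGetD b y []) x (-1))

def pvStepB (st : List (List Int) × List (List Int)) (x y v : Int) :
    List (List Int) × List (List Int) :=
  (PySem.List.pySetD st.1 y (PySem.List.pySetD (PySem.List.pyGetD st.1 y []) x
      (PySem.List.pyGetD (PySem.List.pyGetD st.1 y []) x 0 + 1)),
   PySem.List.pySetD st.2 y (PySem.List.pySetD (PySem.List.pyGetD st.2 y []) x v))

theorem pvIdx_some_lt {n : Nat} {i : Int} {k : Nat} (h : PySem.List.pyIdx? n i = some k) : k < n := by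
  unfold PySem.List.pyIdx? at h
  split_ifs at h <;> simp_all <;> omega

theorem getD_set_of_lt {l : List Int} {n : Nat} (v : Int) (hn : n < l.length) (k : Nat) (d : Int) :
    (l.set n v).getD k d = if k = n then v else l.getD k d := by
  simp [List.getD, List.getElem?_set, hn]
  rcases eq_or_ne n k with h | h <;> simp [h]
  exact fun hh => absurd hh.symm h

theorem getD_set_of_lt' {n : Nat} (l : List (List Int)) (v : List Int) (hn : n < l.length) (k : Nat) (d : List Int) :
    (l.set n v).getD k d = if k = n then v else l.getD k d := by
  simp [List.getD, List.getElem?_set, hn]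
  rcases eq_or_ne n k with h | h <;> simp [h]
  exact fun hh => absurd hh.symm h

theorem pvRow_step (br cr orr : List Int) (x v : Int) (hv : 1 ≤ v) (h : pvRowRel br cr orr) :
    pvRowRel
      (if PySem.List.pyGetD br x 0 = 0 then PySem.List.pySetD br x v
       else PySem.List.pySetD br x (-1))
      (PySem.List.pySetD cr x (PySem.List.pyGetD cr x 0 + 1))
      (PySem.List.pySetD orr x v) := by
  obtain ⟨hbc, hco, hcell⟩ := h
  cases hidx : PySem.List.pyIdx? br.length x with
  | none =>
      have hc : PySem.List.pyIdx? cr.length x = none := by rw [← hbc]; exact hidx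
      have ho : PySem.List.pyIdx? orr.length x = none := by rw [← hco]; exact hc
      simp [PySem.List.pySetD, PySem.List.pySet?, PySem.List.pyGetD, PySem.List.pyGet?, hidx, hc, ho]
      exact ⟨hbc, hco, hcell⟩
  | some k =>
      have hk : k < br.length := pvIdx_some_lt hidx
      have hc : PySem.List.pyIdx? cr.length x = some k := by rw [← hbc]; exact hidx
      have ho : PySem.List.pyIdx? orr.length x = some k := by rw [← hco, ← hbc]; exact hidx
      have hkc : k < cr.length := hbc ▸ hk
      have hko : k < orr.length := hco ▸ hkc
      have hread : PySem.List.pyGetD br x 0 = br.getD k 0 := by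
        simp [PySem.List.pyGetD, PySem.List.pyGet?, hidx, List.getD,
          List.getElem?_eq_getElem hk]
      have hreadc : PySem.List.pyGetD cr x 0 = cr.getD k 0 := by
        simp [PySem.List.pyGetD, PySem.List.pyGet?, hc, List.getD,
          List.getElem?_eq_getElem hkc]
      have hset : ∀ (l : List Int) (hl : PySem.List.pyIdx? l.length x = some k) (u : Int),
          PySem.List.pySetD l x u = l.set k u := by
        intro l hl u; simp [PySem.List.pySetD, PySem.List.pySet?, hl]
      obtain ⟨hc0, h0, h1, h2⟩ := hcell k
      by_cases hb0 : br.getD k 0 = 0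
      · -- cr cell must be 0
        have hcr0 : cr.getD k 0 = 0 := by
          rcases (by omega : cr.getD k 0 = 0 ∨ cr.getD k 0 = 1 ∨ 2 ≤ cr.getD k 0) with h | h | h
          · exact h
          · exfalso; obtain ⟨hbo, hoo⟩ := h1 h; omega
          · exfalso; have := h2 h; omega
        simp only [hset br hidx, hset cr hc, hset orr ho, hread, hreadc, hcr0]
        rw [if_pos hb0]
        refine ⟨by simpa using hbc, by simpa using hco, ?_⟩
        intro k'
        rw [getD_set_of_lt v hk, getD_set_of_lt (0+1) hkc, getD_set_of_lt v hko]
        by_cases hkk : k' = k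
        · subst hkk
          rw [if_pos rfl, if_pos rfl, if_pos rfl]
          exact ⟨by omega, by omega, fun _ => ⟨rfl, hv⟩, by omega⟩
        · rw [if_neg hkk, if_neg hkk, if_neg hkk]; exact hcell k'
      · have hcr1 : 1 ≤ cr.getD k 0 := by
          rcases (by omega : cr.getD k 0 = 0 ∨ 1 ≤ cr.getD k 0) with h | h
          · exact absurd (h0 h).1 hb0
          · exact h
        simp only [hset br hidx, hset cr hc, hset orr ho, hread, hreadc]
        rw [if_neg hb0]
        refine ⟨by simpa using hbc, by simpa using hco, ?_⟩
        intro k'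
        rw [getD_set_of_lt (-1) hk, getD_set_of_lt _ hkc, getD_set_of_lt v hko]
        by_cases hkk : k' = k
        · subst hkk
          rw [if_pos rfl, if_pos rfl, if_pos rfl]
          exact ⟨by omega, by omega, by omega, fun _ => rfl⟩
        · rw [if_neg hkk, if_neg hkk, if_neg hkk]; exact hcell k'

theorem pvGrid_step (b : List (List Int)) (st : List (List Int) × List (List Int)) (x y v : Int)
    (hv : 1 ≤ v) (h : pvRel b st.1 st.2) :
    pvRel (pvStepA b x y v) (pvStepB st x y v).1 (pvStepB st x y v).2 := by
  obtain ⟨hbc, hco, hrow⟩ := h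
  obtain ⟨c, o⟩ := st
  simp only at hbc hco hrow ⊢
  cases hidx : PySem.List.pyIdx? b.length y with
  | none =>
      have hc : PySem.List.pyIdx? c.length y = none := by rw [← hbc]; exact hidx
      have ho : PySem.List.pyIdx? o.length y = none := by rw [← hco]; exact hc
      unfold pvStepA pvStepB
      simp [PySem.List.pySetD, PySem.List.pySet?, hidx, hc, ho]
      exact ⟨hbc, hco, hrow⟩
  | some j =>
      have hj : j < b.length := pvIdx_some_lt hidx
      have hc : PySem.List.pyIdx? c.length y = some j := by rw [← hbc]; exact hidx
      have ho : PySem.List.pyIdx? o.length y = some j := by rw [← hco]; exact hc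
      have hjc : j < c.length := hbc ▸ hj
      have hjo : j < o.length := hco ▸ hjc
      have hgetb : PySem.List.pyGetD b y [] = b.getD j [] := by
        simp [PySem.List.pyGetD, PySem.List.pyGet?, hidx, List.getD, List.getElem?_eq_getElem hj]
      have hgetc : PySem.List.pyGetD c y [] = c.getD j [] := by
        simp [PySem.List.pyGetD, PySem.List.pyGet?, hc, List.getD, List.getElem?_eq_getElem hjc]
      have hgeto : PySem.List.pyGetD o y [] = o.getD j [] := by
        simp [PySem.List.pyGetD, PySem.List.pyGet?, ho, List.getD, List.getElem?_eq_getElem hjo]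
      have hrstep := pvRow_step (b.getD j []) (c.getD j []) (o.getD j []) x v hv (hrow j)
      have hsetb : ∀ r, PySem.List.pySetD b y r = b.set j r := by
        intro r; simp [PySem.List.pySetD, PySem.List.pySet?, hidx]
      have hsetc : ∀ r, PySem.List.pySetD c y r = c.set j r := by
        intro r; simp [PySem.List.pySetD, PySem.List.pySet?, hc]
      have hseto : ∀ r, PySem.List.pySetD o y r = o.set j r := by
        intro r; simp [PySem.List.pySetD, PySem.List.pySet?, ho]
      unfold pvStepA pvStepB
      simp only [hgetb, hgetc, hgeto, hsetb, hsetc, hseto]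
      set brow := b.getD j [] with hbrow
      by_cases hb0 : PySem.List.pyGetD brow x 0 = 0
      · rw [if_pos hb0]
        refine ⟨by simpa using hbc, by simpa using hco, ?_⟩
        intro j'
        rw [getD_set_of_lt' b _ hj, getD_set_of_lt' c _ hjc, getD_set_of_lt' o _ hjo]
        by_cases hjj : j' = j
        · subst hjj
          rw [if_pos rfl, if_pos rfl, if_pos rfl]
          simpa [hb0] using hrstep
        · rw [if_neg hjj, if_neg hjj, if_neg hjj]; exact hrow j'
      · rw [if_neg hb0]
        refine ⟨by simpa using hbc, by simpa using hco, ?_⟩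
        intro j'
        rw [getD_set_of_lt' b _ hj, getD_set_of_lt' c _ hjc, getD_set_of_lt' o _ hjo]
        by_cases hjj : j' = j
        · subst hjj
          rw [if_pos rfl, if_pos rfl, if_pos rfl]
          simpa [hb0] using hrstep
        · rw [if_neg hjj, if_neg hjj, if_neg hjj]; exact hrow j'

theorem pvShape_step (H W : Nat) (b : List (List Int)) (x y v : Int) (h : pvShape H W b) :
    pvShape H W (pvStepA b x y v) := by
  obtain ⟨hlen, hrows⟩ := h
  unfold pvStepA
  cases hidx : PySem.List.pyIdx? b.length y with
  | none =>
      simp only [PySem.List.pySetD, PySem.List.pySet?, hidx, Option.map_none, Option.getD_none]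
      split <;> exact ⟨hlen, hrows⟩
  | some j =>
      have hj : j < b.length := pvIdx_some_lt hidx
      have hget : PySem.List.pyGetD b y [] = b[j] := by
        simp [PySem.List.pyGetD, PySem.List.pyGet?, hidx, List.getElem?_eq_getElem hj]
      have hsetb : ∀ r : List Int, PySem.List.pySetD b y r = b.set j r := by
        intro r; simp [PySem.List.pySetD, PySem.List.pySet?, hidx]
      have hrow : ∀ u : Int, (PySem.List.pySetD b[j] x u).length = W := by
        intro u
        have : (PySem.List.pySetD b[j] x u).length = b[j].length := by
          unfold PySem.List.pySetD PySem.List.pySet?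
          cases hridx : PySem.List.pyIdx? b[j].length x <;> simp
        rw [this]; exact hrows _ (List.getElem_mem hj)
      have main : ∀ u : Int, pvShape H W (b.set j (PySem.List.pySetD b[j] x u)) := by
        intro u
        refine ⟨by simpa using hlen, ?_⟩
        intro r hr
        rcases List.mem_or_eq_of_mem_set hr with h | h
        · exact hrows r h
        · rw [h]; exact hrow u
      rw [hget]
      split <;> rw [hsetb] <;> exact main _

theorem pvFoldRel {α β σ : Type} (R : α → β → Prop) (fa : α → σ → α) (fb : β → σ → β)
    (xs : List σ) (h : ∀ x ∈ xs, ∀ a b, R a b → R (fa a x) (fb b x)) :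
    ∀ a b, R a b → R (xs.foldl fa a) (xs.foldl fb b) := by
  induction xs with
  | nil => intro a b hab; exact hab
  | cons x xs ih =>
      intro a b hab
      simp only [List.foldl_cons]
      exact ih (fun z hz => h z (List.mem_cons_of_mem _ hz)) _ _ (h x List.mem_cons_self _ _ hab)

theorem pvGetD_replicate {α : Type} (n : Nat) (a : α) (j : Nat) (d : α) :
    (List.replicate n a).getD j d = if j < n then a else d := by
  simp [List.getD, List.getElem?_replicate]
  split <;> simp

theorem pvInit_rel (H W : Nat) :
    pvRel (List.replicate H (List.replicate W (0 : Int)))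
          (List.replicate H (List.replicate W (0 : Int)))
          (List.replicate H (List.replicate W (0 : Int))) := by
  have cell0 : pvCell 0 0 0 := by unfold pvCell; omega
  have row0 : pvRowRel (List.replicate W (0 : Int)) (List.replicate W 0) (List.replicate W 0) := by
    refine ⟨rfl, rfl, ?_⟩
    intro k
    rw [pvGetD_replicate]
    split <;> exact cell0
  have rownil : pvRowRel ([] : List Int) [] [] := ⟨rfl, rfl, fun k => by simp [List.getD]; exact cell0⟩
  refine ⟨rfl, rfl, ?_⟩
  intro j
  rw [pvGetD_replicate]
  split
  · exact row0
  · exact rownil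

theorem pvInit_shape (H W : Nat) :
    pvShape H W (List.replicate H (List.replicate W (0 : Int))) := by
  refine ⟨List.length_replicate, ?_⟩
  intro r hr
  rw [List.eq_of_mem_replicate hr]
  exact List.length_replicate

theorem pvGetD_eq_getElem' {α : Type} (l : List α) (j : Nat) (d : α) (h : j < l.length) :
    l.getD j d = l[j] := List.getD_eq_getElem l d h

theorem pvFinal (h w : Int) (b c o : List (List Int))
    (hrel : pvRel b c o) (hsh : pvShape h.toNat w.toNat b) :
    b = (PySem.List.pyRange 0 h 1).map (fun y =>
      (PySem.List.pyRange 0 w 1).map (fun x =>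
        if PySem.List.pyGetD (PySem.List.pyGetD c y []) x 0 = 0 then 0
        else if PySem.List.pyGetD (PySem.List.pyGetD c y []) x 0 = 1 then
          PySem.List.pyGetD (PySem.List.pyGetD o y []) x 0
        else -1)) := by
  obtain ⟨hbc, hco, hrow⟩ := hrel
  obtain ⟨hlen, hrows⟩ := hsh
  have hrlen : (PySem.List.pyRange 0 h 1).length = h.toNat := by
    rw [PySem.List.length_pyRange_one]; norm_num
  have hwlen : (PySem.List.pyRange 0 w 1).length = w.toNat := by
    rw [PySem.List.length_pyRange_one]; norm_num
  apply List.ext_getElem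
  · simp [hrlen, hlen]
  intro j hj hj'
  have hjH : j < h.toNat := by rwa [hlen] at hj
  rw [List.getElem_map]
  have hyval : (PySem.List.pyRange 0 h 1)[j]'(by omega) = (j : Int) := by
    rw [PySem.List.getElem_pyRange_one]; omega
  rw [hyval]
  have hcj : PySem.List.pyGetD c (j : Int) [] = c.getD j [] := by
    rw [PySem.List.pyGetD_natCast]
  have hoj : PySem.List.pyGetD o (j : Int) [] = o.getD j [] := by
    rw [PySem.List.pyGetD_natCast]
  have hrowlen : b[j].length = w.toNat := hrows _ (List.getElem_mem hj)
  obtain ⟨hl1, hl2, hcell⟩ := hrow j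
  have hbj : b.getD j [] = b[j] := pvGetD_eq_getElem' b j [] hj
  apply List.ext_getElem
  · simp [hrowlen, hwlen]
  intro k hk hk'
  have hkW : k < w.toNat := by rwa [hrowlen] at hk
  rw [List.getElem_map]
  have hxval : (PySem.List.pyRange 0 w 1)[k]'(by omega) = (k : Int) := by
    rw [PySem.List.getElem_pyRange_one]; omega
  rw [hxval, hcj, hoj]
  have hcrow : PySem.List.pyGetD (c.getD j []) (k : Int) 0 = (c.getD j []).getD k 0 := by
    rw [PySem.List.pyGetD_natCast]
  have horow : PySem.List.pyGetD (o.getD j []) (k : Int) 0 = (o.getD j []).getD k 0 := by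
    rw [PySem.List.pyGetD_natCast]
  rw [hcrow, horow]
  have hcellk := hcell k
  rw [hbj] at hcellk
  have hbk : b[j].getD k 0 = b[j][k] := pvGetD_eq_getElem' _ k 0 hk
  rw [hbk] at hcellk
  obtain ⟨hc0, h0, h1, h2⟩ := hcellk
  rcases (by omega : (c.getD j []).getD k 0 = 0 ∨ (c.getD j []).getD k 0 = 1 ∨ 2 ≤ (c.getD j []).getD k 0) with hc | hc | hc
  · rw [if_pos hc]; exact (h0 hc).1
  · rw [if_neg (by omega), if_pos hc]; exact (h1 hc).1
  · rw [if_neg (by omega), if_neg (by omega)]; exact h2 hc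

theorem pvMain (h w : Int) (L : List (Int × (String × (Int × Int × Int × Int))))
    (hL : ∀ p ∈ L, 0 ≤ p.1) :
    (L.foldl (fun bldg p =>
        (PySem.List.pyRange p.2.2.1 p.2.2.2.2.1 1).foldl (fun bldg x =>
          (PySem.List.pyRange p.2.2.2.1 p.2.2.2.2.2 1).foldl (fun bldg y =>
            pvStepA bldg x y (p.1 + 1)) bldg) bldg)
      (List.replicate h.toNat (List.replicate w.toNat (0 : Int)))) =
    (PySem.List.pyRange 0 h 1).map (fun y =>
      (PySem.List.pyRange 0 w 1).map (fun x =>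
        let st := L.foldl (fun st p =>
          (PySem.List.pyRange p.2.2.1 p.2.2.2.2.1 1).foldl (fun st x =>
            (PySem.List.pyRange p.2.2.2.1 p.2.2.2.2.2 1).foldl (fun st y =>
              pvStepB st x y (p.1 + 1)) st) st)
          (List.replicate h.toNat (List.replicate w.toNat (0 : Int)),
           List.replicate h.toNat (List.replicate w.toNat (0 : Int)))
        if PySem.List.pyGetD (PySem.List.pyGetD st.1 y []) x 0 = 0 then 0
        else if PySem.List.pyGetD (PySem.List.pyGetD st.1 y []) x 0 = 1 then
          PySem.List.pyGetD (PySem.List.pyGetD st.2 y []) x 0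
        else -1)) := by
  set R := fun (b : List (List Int)) (st : List (List Int) × List (List Int)) =>
    pvRel b st.1 st.2 ∧ pvShape h.toNat w.toNat b with hR
  have base : R (List.replicate h.toNat (List.replicate w.toNat (0 : Int)))
      (List.replicate h.toNat (List.replicate w.toNat (0 : Int)),
       List.replicate h.toNat (List.replicate w.toNat (0 : Int))) :=
    ⟨pvInit_rel _ _, pvInit_shape _ _⟩
  have hfold := pvFoldRel R
    (fun bldg p =>
        (PySem.List.pyRange p.2.2.1 p.2.2.2.2.1 1).foldl (fun bldg x =>
          (PySem.List.pyRange p.2.2.2.1 p.2.2.2.2.2 1).foldl (fun bldg y =>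
            pvStepA bldg x y (p.1 + 1)) bldg) bldg)
    (fun st p =>
        (PySem.List.pyRange p.2.2.1 p.2.2.2.2.1 1).foldl (fun st x =>
          (PySem.List.pyRange p.2.2.2.1 p.2.2.2.2.2 1).foldl (fun st y =>
            pvStepB st x y (p.1 + 1)) st) st)
    L ?_ _ _ base
  · obtain ⟨hrel, hsh⟩ := hfold
    exact pvFinal h w _ _ _ hrel hsh
  · intro p hp b st hab
    have hv : 1 ≤ p.1 + 1 := by have := hL p hp; omega
    refine pvFoldRel R _ _ _ ?_ _ _ hab
    intro x _ b st hab
    refine pvFoldRel R _ _ _ ?_ _ _ hab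
    intro y _ b st hab
    exact ⟨pvGrid_step b st x y (p.1 + 1) hv hab.1, pvShape_step _ _ b x y _ hab.2⟩

theorem pv_ports_eq (office : List Int) (cubicles : List (String × (Int × Int × Int × Int))) :
    request_space office cubicles = request_space_alt office cubicles := by
  have hL : ∀ p ∈ PySem.List.enumerate cubicles 0, (0:Int) ≤ p.1 := by
    intro p hp
    obtain ⟨k, hk, rfl⟩ := (PySem.List.mem_enumerate_iff cubicles 0 p).1 hp
    simp
  exact pvMain (PySem.List.pyGetD office 3 0) (PySem.List.pyGetD office 2 0)
    (PySem.List.enumerate cubicles 0) hL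

-- ===== VERDICT (by name: the statement is the Claim_ definition above) =====
theorem request_space_spec : Claim_equal_request_space := by
  intro office cubicles _ _
  exact pv_ports_eq office cubicles
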